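-- pv_equiv track=rewrite | github.com/natemago/adventofcode-2021 | day24-arithmetic-logic-unit/solution.py | rev_procedure_1
-- ===== SOURCE A (Python) =====
-- def rev_procedure_1(target):
--     results = {}
--
--     for w in range(1, 10):
--         p = target - w - 6
--         if p < 0:
--             continue
--         if p % 26:
--             continue
--         results[w] = results.get(w) or []
--         results[w].append(p//26)
--
--     return results
-- ===== SOURCE B (Python) =====
-- def rev_procedure_1(target):
--     # At most one w in 1..9 can satisfy (target - w - 6) % 26 == 0:
--     # it has to be (target - 6) % 26.  Closed form, no loop.
--     w = (target - 6) % 26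
--     p = target - w - 6
--     if 1 <= w <= 9 and p >= 0:
--         return {w: [p // 26]}
--     return {}
-- ===== Notes on version B (the rewrite author's own statement) =====
-- stated objective: simpler
-- what changed: Replaces the loop over w in 1..9 and the dict-accumulation with the closed-form observation that only w = (target-6) % 26 can make (target-w-6) divisible by 26, returning a literal one-entry or empty dict.
import Mathlib
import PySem

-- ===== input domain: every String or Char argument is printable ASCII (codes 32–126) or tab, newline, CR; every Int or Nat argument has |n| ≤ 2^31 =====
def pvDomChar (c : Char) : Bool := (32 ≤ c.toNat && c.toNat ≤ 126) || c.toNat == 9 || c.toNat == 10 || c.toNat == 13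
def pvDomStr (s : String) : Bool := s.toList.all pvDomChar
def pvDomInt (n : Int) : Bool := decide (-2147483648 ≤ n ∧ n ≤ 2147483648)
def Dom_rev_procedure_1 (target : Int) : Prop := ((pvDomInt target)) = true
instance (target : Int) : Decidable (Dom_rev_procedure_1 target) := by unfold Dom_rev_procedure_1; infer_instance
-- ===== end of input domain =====

-- B replaces A's loop over w in 1..9 with the closed form w = (target-6) % 26 (simpler, no loop).

-- ===== PORT A =====
def rev_procedure_1 (target : Int) : List (Int × List Int) :=
  (((PySem.List.pyRange 1 10 1).foldl (fun (results : PySem.Dict Int (List Int)) (w : Int) =>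
      let p := target - w - 6
      if p < 0 then results
      else if PySem.Int.mod p 26 ≠ 0 then results
      else
        -- results[w] = results.get(w) or []  (empty-list falsiness spelled out)
        let cur : List Int :=
          match results.get? w with
          | none => []
          | some v => if v = [] then [] else v
        results.insert w (cur ++ [PySem.Int.floordiv p 26]))
    PySem.Dict.empty)).items

-- ===== PORT B =====
def rev_procedure_1_alt (target : Int) : List (Int × List Int) :=
  let w := PySem.Int.mod (target - 6) 26
  let p := target - w - 6
  if 1 ≤ w ∧ w ≤ 9 ∧ 0 ≤ p then [(w, [PySem.Int.floordiv p 26])] else []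

-- ===== PRECONDITION & SPEC =====
def Spec_rev_procedure_1 (target : Int) (out : List (Int × List Int)) : Prop := out = rev_procedure_1_alt target
instance (target : Int) (out : List (Int × List Int)) : Decidable (Spec_rev_procedure_1 target out) := by unfold Spec_rev_procedure_1; infer_instance

-- ===== CLAIM (what is proved, stated in full; the proofs are below) =====
def Claim_equal_rev_procedure_1 : Prop := ∀ (target : Int), Dom_rev_procedure_1 target → Spec_rev_procedure_1 target (rev_procedure_1 target)

-- ===== LEMMAS AND PROOFS =====

-- The loop body of A, as a named function (only used by the proofs; the port keeps its lambda).
def pvStep (target : Int) (results : PySem.Dict Int (List Int)) (w : Int) : PySem.Dict Int (List Int) :=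
  let p := target - w - 6
  if p < 0 then results
  else if PySem.Int.mod p 26 ≠ 0 then results
  else
    let cur : List Int :=
      match results.get? w with
      | none => []
      | some v => if v = [] then [] else v
    results.insert w (cur ++ [PySem.Int.floordiv p 26])

-- A's loop fires for at most one w, namely (target-6) % 26; the tail of the range is a no-op.
theorem pvFoldChar (target : Int) : ∀ (n : Nat) (a : Int) (acc : PySem.Dict Int (List Int)),
    a = 10 - (n : Int) → 1 ≤ a →
    (PySem.List.pyRange a 10 1).foldl (pvStep target) acc =
      (if a ≤ (target - 6) % 26 ∧ (target - 6) % 26 < 10 ∧ 6 + (target - 6) % 26 ≤ target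
       then pvStep target acc ((target - 6) % 26)
       else acc) := by
  intro n
  induction n with
  | zero =>
    intro a acc ha _
    rw [PySem.List.pyRange_one_eq_nil (by omega)]
    rw [if_neg (by omega)]
    rfl
  | succ k ih =>
    intro a acc ha h1
    rw [PySem.List.pyRange_one_cons (by omega), List.foldl_cons]
    by_cases hf : (target - 6) % 26 = a ∧ 6 + a ≤ target
    · rw [ih (a + 1) _ (by push_cast [ha]; ring) (by omega)]
      rw [if_neg (by omega), if_pos (by omega), hf.1]
    · have hskip : pvStep target acc a = acc := by
        unfold pvStep
        dsimp only
        split_ifs with hlt hmod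
        · rfl
        · rfl
        · exfalso
          rw [PySem.Int.mod_eq_emod_of_pos (by norm_num)] at hmod
          rcases not_and_or.mp hf with h | h <;> omega
      rw [hskip, ih (a + 1) acc (by push_cast [ha]; ring) (by omega)]
      by_cases hc : a + 1 ≤ (target - 6) % 26 ∧ (target - 6) % 26 < 10 ∧ 6 + (target - 6) % 26 ≤ target
      · rw [if_pos hc, if_pos (by omega)]
      · rw [if_neg hc, if_neg (by
          rcases not_and_or.mp hf with h | h
          · intro hx
            rcases not_and_or.mp hc with h' | h' <;> omega
          · intro hx
            rcases not_and_or.mp hc with h' | h' <;> omega)]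

-- ===== VERDICT (by name: the statement is the Claim_ definition above) =====
theorem rev_procedure_1_spec : Claim_equal_rev_procedure_1 := by
  intro target _
  unfold Spec_rev_procedure_1 rev_procedure_1 rev_procedure_1_alt
  have hl : (fun (results : PySem.Dict Int (List Int)) (w : Int) =>
      let p := target - w - 6
      if p < 0 then results
      else if PySem.Int.mod p 26 ≠ 0 then results
      else
        let cur : List Int :=
          match results.get? w with
          | none => []
          | some v => if v = [] then [] else v
        results.insert w (cur ++ [PySem.Int.floordiv p 26])) = pvStep target := rfl
  rw [hl, pvFoldChar target 9 1 PySem.Dict.empty (by norm_num) (by norm_num)]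
  dsimp only
  rw [PySem.Int.mod_eq_emod_of_pos (by norm_num)]
  have hm0 : 0 ≤ (target - 6) % 26 := Int.emod_nonneg _ (by norm_num)
  have hm1 : (target - 6) % 26 < 26 := Int.emod_lt_of_pos _ (by norm_num)
  by_cases hc : 1 ≤ (target - 6) % 26 ∧ (target - 6) % 26 < 10 ∧ 6 + (target - 6) % 26 ≤ target
  · rw [if_pos hc, if_pos (by omega)]
    unfold pvStep
    dsimp only
    rw [if_neg (by omega), if_neg (by
      rw [PySem.Int.mod_eq_emod_of_pos (by norm_num)]
      simp only [ne_eq, not_not]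
      omega)]
    simp [PySem.Dict.insert, PySem.Dict.empty, PySem.Dict.get?,
      PySem.Dict.contains]
  · rw [if_neg hc, if_neg (by
      intro hx
      rcases not_and_or.mp hc with h | h
      · omega
      · rcases not_and_or.mp h with h' | h' <;> omega)]
    rfl
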